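-- pv_equiv track=rewrite | github.com/damianoazzolini/take | src/take/aggregators.py | _compute_first_last
-- ===== SOURCE A (Python) =====
-- def _compute_first_last(first_or_last : str, aggregate_lines: 'list[tuple[str,str]]', filename : str | None) -> str:
--     idx = 0 if first_or_last == "first" else -1
--
--     if filename is None:
--         return aggregate_lines[idx][1].rstrip()
--
--     # filename is not none
--     lines = aggregate_lines if first_or_last == "first" else reversed(aggregate_lines)
--     for line in lines:
--         if line[0] == filename:
--             return line[1].rstrip()
--     return "-"
-- ===== SOURCE B (Python) =====
-- def _compute_first_last(first_or_last : str, aggregate_lines: 'list[tuple[str,str]]', filename : str | None) -> str: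
--     idx = 0 if first_or_last == "first" else -1
--     if filename is None:
--         return aggregate_lines[idx][1].rstrip()
--     matches = [line[1].rstrip() for line in aggregate_lines if line[0] == filename]
--     return matches[idx] if matches else "-"
-- ===== Notes on version B (the rewrite author's own statement) =====
-- stated objective: simpler
-- what changed: The direction-dependent scan (forward vs reversed) with early exit is replaced by one full-scan comprehension collecting all matching lines, indexed by the same 0/-1 idx as the filename-is-None branch, unifying first/last into a single code path.
import Mathlib
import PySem

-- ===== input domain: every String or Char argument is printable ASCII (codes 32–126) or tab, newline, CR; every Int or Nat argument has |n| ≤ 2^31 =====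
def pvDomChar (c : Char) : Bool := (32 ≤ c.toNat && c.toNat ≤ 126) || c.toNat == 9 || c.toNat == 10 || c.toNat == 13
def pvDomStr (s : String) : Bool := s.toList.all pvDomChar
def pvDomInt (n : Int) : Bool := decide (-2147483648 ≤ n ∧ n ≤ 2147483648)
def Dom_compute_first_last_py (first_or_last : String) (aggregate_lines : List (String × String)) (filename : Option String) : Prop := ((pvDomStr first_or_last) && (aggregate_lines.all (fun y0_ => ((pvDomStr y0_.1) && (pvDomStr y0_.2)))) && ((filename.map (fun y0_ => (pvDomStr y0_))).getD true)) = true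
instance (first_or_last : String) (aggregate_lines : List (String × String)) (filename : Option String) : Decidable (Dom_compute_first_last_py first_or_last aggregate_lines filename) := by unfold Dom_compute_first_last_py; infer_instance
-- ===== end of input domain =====

-- B replaces A's direction-dependent (forward vs reversed) early-exit scan by one
-- comprehension collecting all ms, indexed with the same 0/-1 idx; objective: simpler.

-- ===== PORT A =====
-- the for-loop over `lines` with early return
def pvAFind (filename : String) : List (String × String) → String
  | [] => "-"
  | line :: rest =>
    if line.1 == filename then PySem.Str.rstrip line.2 else pvAFind filename rest

def compute_first_last_py (first_or_last : String) (aggregate_lines : List (String × String)) (filename : Option String) : String :=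
  let idx : Int := if first_or_last == "first" then 0 else -1
  match filename with
  | none =>
    -- aggregate_lines[idx][1].rstrip(); pyGetD is exact under Pre_ (IndexError excluded)
    PySem.Str.rstrip (PySem.List.pyGetD aggregate_lines idx ("", "")).2
  | some f =>
    let lines := if first_or_last == "first" then aggregate_lines else aggregate_lines.reverse
    pvAFind f lines

-- ===== PORT B =====
def compute_first_last_py_alt (first_or_last : String) (aggregate_lines : List (String × String)) (filename : Option String) : String :=
  let idx : Int := if first_or_last == "first" then 0 else -1
  match filename with
  | none =>
    PySem.Str.rstrip (PySem.List.pyGetD aggregate_lines idx ("", "")).2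
  | some f =>
    let ms := (aggregate_lines.filter (fun line => line.1 == f)).map
      (fun line => PySem.Str.rstrip line.2)
    if ms = [] then "-" else PySem.List.pyGetD ms idx ""

-- ===== PRECONDITION & SPEC =====
-- Pre_ excludes only the inputs where A (and B) raise IndexError:
-- filename is None together with an empty aggregate_lines.
def Pre_compute_first_last_py (first_or_last : String) (aggregate_lines : List (String × String)) (filename : Option String) : Prop :=
  filename = none → aggregate_lines ≠ []
instance (first_or_last : String) (aggregate_lines : List (String × String)) (filename : Option String) : Decidable (Pre_compute_first_last_py first_or_last aggregate_lines filename) := by unfold Pre_compute_first_last_py; infer_instance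

def pvWitness_compute_first_last_py : String × (List (String × String)) × Option String :=
  ("first", [("f.txt", "hello ")], some "f.txt")

def Spec_compute_first_last_py (first_or_last : String) (aggregate_lines : List (String × String)) (filename : Option String) (out : String) : Prop := out = compute_first_last_py_alt first_or_last aggregate_lines filename
instance (first_or_last : String) (aggregate_lines : List (String × String)) (filename : Option String) (out : String) : Decidable (Spec_compute_first_last_py first_or_last aggregate_lines filename out) := by unfold Spec_compute_first_last_py; infer_instance

-- ===== CLAIM =====
def Claim_equal_compute_first_last_py : Prop := ∀ (first_or_last : String) (aggregate_lines : List (String × String)) (filename : Option String), Dom_compute_first_last_py first_or_last aggregate_lines filename → Pre_compute_first_last_py first_or_last aggregate_lines filename → Spec_compute_first_last_py first_or_last aggregate_lines filename (compute_first_last_py first_or_last aggregate_lines filename)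

-- ===== LEMMAS AND PROOFS =====

-- A's scan returns rstrip of the second component of the first filter match, or "-".
theorem pvAFind_eq_filter (f : String) (ls : List (String × String)) :
    pvAFind f ls = match ls.filter (fun line => line.1 == f) with
      | [] => "-"
      | m :: _ => PySem.Str.rstrip m.2 := by
  induction ls with
  | nil => rfl
  | cons l rest ih =>
    by_cases h : l.1 == f
    · simp [pvAFind, h]
    · simp only [pvAFind, List.filter_cons, h, if_neg, Bool.false_eq_true, not_false_iff]
      simpa [h] using ih

theorem compute_first_last_py_spec' :
    ∀ (first_or_last : String) (aggregate_lines : List (String × String)) (filename : Option String),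
      Pre_compute_first_last_py first_or_last aggregate_lines filename →
      compute_first_last_py first_or_last aggregate_lines filename
        = compute_first_last_py_alt first_or_last aggregate_lines filename := by
  intro fol ls fn hpre
  match fn with
  | none =>
    rfl
  | some f =>
    simp only [compute_first_last_py, compute_first_last_py_alt]
    by_cases hfirst : fol == "first"
    · -- forward scan: first match = ms[0]
      simp only [hfirst, if_pos]
      rw [pvAFind_eq_filter]
      cases hF : ls.filter (fun line => line.1 == f) with
      | nil => simp
      | cons m t =>
        simp [PySem.List.pyGetD_zero_cons]
    · -- reversed scan: first match in reverse = ms[-1]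
      simp only [hfirst, if_neg, Bool.false_eq_true, not_false_iff]
      rw [pvAFind_eq_filter]
      rw [List.filter_reverse]
      cases hF : ls.filter (fun line => line.1 == f) with
      | nil => simp
      | cons m t =>
        simp only [List.map_cons, reduceCtorEq, not_false_iff, if_neg]
        -- first match of the reversed list = last match; xs[-1] via pyGetD_neg_one_append_singleton
        rcases List.eq_nil_or_concat t with ht | ⟨t', x, rfl⟩
        · subst ht
          simpa using (PySem.List.pyGetD_neg_one_append_singleton ([] : List String)
            (PySem.Str.rstrip m.2) "").symm
        · have := PySem.List.pyGetD_neg_one_append_singleton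
            (PySem.Str.rstrip m.2 :: List.map (fun line => PySem.Str.rstrip line.2) t')
            (PySem.Str.rstrip x.2) ""
          simpa [List.concat_eq_append] using this.symm

-- ===== VERDICT =====
theorem compute_first_last_py_spec : Claim_equal_compute_first_last_py := by
  intro fol ls fn _ hpre
  unfold Spec_compute_first_last_py
  exact compute_first_last_py_spec' fol ls fn hpre
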